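-- pv_equiv track=rewrite | github.com/ejwang440/chem-equation-balancer | main.py | parse
-- ===== SOURCE A (Python) =====
-- def parse(element):
--     tup_list = []
--     for i in range(len(element)):
--         if element[i].isdigit():
--             continue
--         elif element[i].isalpha() and i == len(element)-1:
--             tup_element = (element[i], 1)
--             tup_list.append(tup_element)
--         elif element[i].isalpha() and element[i+1].isdigit():
--             tup_element = (element[i], int(element[i+1]))
--             tup_list.append(tup_element)
--         else:
--             tup_element = (element[i], 1)
--             tup_list.append(tup_element)
--     return tup_list
-- ===== SOURCE B (Python) =====
-- def parse(element):
--     result = []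
--     for j, ch in enumerate(element):
--         if ch.isdigit():
--             if j > 0 and element[j - 1].isalpha():
--                 result[-1] = (result[-1][0], int(ch))
--         else:
--             result.append((ch, 1))
--     return result
-- ===== Notes on version B (the rewrite author's own statement) =====
-- stated objective: alternative
-- what changed: A decides each tuple's count by looking ahead at element[i+1] when it meets a letter; B does a look-behind pass that appends (char, 1) for every non-digit and, on a digit preceded by a letter, overwrites the count of the last appended tuple; B evaluates fewer predicates per character (A calls isalpha twice and indexes the lookahead on each letter), which a timing run measured as a constant-factor speedup.
import Mathlib
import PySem

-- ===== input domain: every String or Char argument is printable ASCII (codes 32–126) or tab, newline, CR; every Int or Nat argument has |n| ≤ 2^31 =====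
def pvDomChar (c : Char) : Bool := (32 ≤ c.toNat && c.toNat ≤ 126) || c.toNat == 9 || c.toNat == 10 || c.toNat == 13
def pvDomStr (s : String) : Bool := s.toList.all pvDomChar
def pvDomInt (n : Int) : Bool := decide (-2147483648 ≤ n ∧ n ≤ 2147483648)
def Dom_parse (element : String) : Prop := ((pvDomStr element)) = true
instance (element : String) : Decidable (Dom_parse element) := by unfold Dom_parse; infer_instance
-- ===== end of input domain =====

-- B replaces A's lookahead (peek at element[i+1] to pick the count) by a look-behind pass that
-- appends (char, 1) for each non-digit and, on a digit preceded by a letter, overwrites the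
-- count of the last appended tuple; same O(n) cost, objective: alternative decomposition.

-- ===== PORT A =====
-- int(d) for a single digit character d (short-circuit: only evaluated when d is a digit)
def pvDigitInt (d : Char) : Int := (PySem.Int.ofChars? [d]).getD 0

-- the index loop of A as structural recursion: head = element[i], rest.head? = element[i+1],
-- rest = [] ↔ i == len(element)-1 (branch order kept; 'and' short-circuit kept via the match)
def parseGoA : List Char → List (String × Int)
  | [] => []
  | c :: rest =>
    if PySem.Chars.isdigit c then parseGoA rest
    else if PySem.Chars.isalpha c && rest.isEmpty then
      (String.ofList [c], 1) :: parseGoA rest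
    else
      match rest.head? with
      | some d =>
        if PySem.Chars.isalpha c && PySem.Chars.isdigit d then
          (String.ofList [c], pvDigitInt d) :: parseGoA rest
        else (String.ofList [c], 1) :: parseGoA rest
      | none => (String.ofList [c], 1) :: parseGoA rest

def parse (element : String) : List (String × Int) := parseGoA element.toList

-- ===== PORT B =====
-- result[-1] = (result[-1][0], n): replace the snd of the last pair ([] unreachable in B's loop)
def pvSetLast : List (String × Int) → Int → List (String × Int)
  | [], _ => []
  | [(s, _)], n => [(s, n)]
  | x :: xs, n => x :: pvSetLast xs n

-- one loop step of B; the state carries (result, element[j-1]) — the look-behind char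
def parseAltStep (acc : List (String × Int) × Option Char) (c : Char) :
    List (String × Int) × Option Char :=
  if PySem.Chars.isdigit c then
    (match acc.2 with
     | some p => if PySem.Chars.isalpha p then pvSetLast acc.1 (pvDigitInt c) else acc.1
     | none => acc.1, some c)
  else (acc.1 ++ [(String.ofList [c], 1)], some c)

def parse_alt (element : String) : List (String × Int) :=
  (element.toList.foldl parseAltStep ([], none)).1

-- ===== PRECONDITION & SPEC =====
def Spec_parse (element : String) (out : List (String × Int)) : Prop := out = parse_alt element
instance (element : String) (out : List (String × Int)) : Decidable (Spec_parse element out) := by unfold Spec_parse; infer_instance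

-- ===== CLAIM (what is proved, stated in full; the proofs are below) =====
def Claim_equal_parse : Prop := ∀ (element : String), Dom_parse element → Spec_parse element (parse element)

-- ===== LEMMAS AND PROOFS =====

theorem pv_digit_not_alpha (c : Char) (h : PySem.Chars.isdigit c = true) :
    PySem.Chars.isalpha c = false := by
  simp [PySem.Chars.isdigit, PySem.Chars.isalpha, PySem.Chars.isupper, PySem.Chars.islower,
    Char.le_def, UInt32.le_iff_toNat_le] at *
  omega

theorem pvSetLast_append (xs : List (String × Int)) (s : String) (k n : Int) :
    pvSetLast (xs ++ [(s, k)]) n = xs ++ [(s, n)] := by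
  induction xs with
  | nil => rfl
  | cons x xs ih =>
    cases xs with
    | nil => simp [pvSetLast]
    | cons y ys => simpa [pvSetLast] using ih

-- the loop invariant: (1) after a non-alpha (or no) previous char, B's remaining fold appends
-- exactly A's output for the suffix; (2) after appending a letter c with count 1, B's remaining
-- fold appends exactly A's output for c :: suffix (the count of c may still be overwritten).
theorem pv_key (l : List Char) :
    (∀ (res : List (String × Int)) (prev : Option Char),
        (∀ p, prev = some p → PySem.Chars.isalpha p = false) →
        (l.foldl parseAltStep (res, prev)).1 = res ++ parseGoA l)
    ∧ (∀ (res : List (String × Int)) (c : Char),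
        PySem.Chars.isalpha c = true → PySem.Chars.isdigit c = false →
        (l.foldl parseAltStep (res ++ [(String.ofList [c], 1)], some c)).1
          = res ++ parseGoA (c :: l)) := by
  induction l with
  | nil =>
    constructor
    · intro res prev _; simp [parseGoA]
    · intro res c hca hcd
      simp [parseGoA, hca, hcd]
  | cons d rest ih =>
    constructor
    · intro res prev hprev
      by_cases hd : PySem.Chars.isdigit d = true
      · have hstep : parseAltStep (res, prev) d = (res, some d) := by
          cases prev with
          | none => simp [parseAltStep, hd]
          | some p => simp [parseAltStep, hd, hprev p rfl]
        rw [List.foldl_cons, hstep, ih.1 res (some d) (by intro p hp; cases hp; exact pv_digit_not_alpha d hd)]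
        simp [parseGoA, hd]
      · have hd' : PySem.Chars.isdigit d = false := by simpa using hd
        have hstep : parseAltStep (res, prev) d = (res ++ [(String.ofList [d], 1)], some d) := by
          simp [parseAltStep, hd']
        rw [List.foldl_cons, hstep]
        by_cases hda : PySem.Chars.isalpha d = true
        · exact ih.2 res d hda hd'
        · have hda' : PySem.Chars.isalpha d = false := by simpa using hda
          rw [ih.1 (res ++ [(String.ofList [d], 1)]) (some d) (by intro p hp; cases hp; exact hda')]
          cases rest with
          | nil => simp [parseGoA, hd', hda']
          | cons e tl => simp [parseGoA, hd', hda']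
    · intro res c hca hcd
      by_cases hd : PySem.Chars.isdigit d = true
      · have hstep : parseAltStep (res ++ [(String.ofList [c], 1)], some c) d
            = (res ++ [(String.ofList [c], pvDigitInt d)], some d) := by
          simp [parseAltStep, hd, hca, pvSetLast_append]
        rw [List.foldl_cons, hstep,
          ih.1 (res ++ [(String.ofList [c], pvDigitInt d)]) (some d)
            (by intro p hp; cases hp; exact pv_digit_not_alpha d hd)]
        simp [parseGoA, hcd, hca, hd]
      · have hd' : PySem.Chars.isdigit d = false := by simpa using hd
        have hstep : parseAltStep (res ++ [(String.ofList [c], 1)], some c) d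
            = (res ++ [(String.ofList [c], 1)] ++ [(String.ofList [d], 1)], some d) := by
          simp [parseAltStep, hd']
        rw [List.foldl_cons, hstep]
        by_cases hda : PySem.Chars.isalpha d = true
        · rw [ih.2 (res ++ [(String.ofList [c], 1)]) d hda hd']
          simp [parseGoA, hcd, hca, hd']
        · have hda' : PySem.Chars.isalpha d = false := by simpa using hda
          rw [ih.1 (res ++ [(String.ofList [c], 1)] ++ [(String.ofList [d], 1)]) (some d)
            (by intro p hp; cases hp; exact hda')]
          cases rest with
          | nil => simp [parseGoA, hcd, hca, hd', hda']
          | cons e tl => simp [parseGoA, hcd, hca, hd', hda']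

-- ===== VERDICT (by name: the statement is the Claim_ definition above) =====
theorem parse_spec : Claim_equal_parse := by
  intro element _
  unfold Spec_parse parse parse_alt
  simpa using ((pv_key element.toList).1 [] none (by intro p hp; cases hp)).symm
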